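-- pv_equiv track=rewrite | github.com/oznakn/metu-hw | ceng111/the4/the4.py | convert_string_absolute_path
-- ===== SOURCE A (Python) =====
-- def convert_string_absolute_path(curr_dir, relative_path_string):
--     items = relative_path_string.split('/')
--
--     if len(items) >= 1 and items[0] == '':
--         curr_dir = []
--
--     for i in range(len(items) - 1, -1, -1):
--         if items[i] == '':
--             del items[i]
--
--     return convert_absolute_path(curr_dir, items)
--
-- def convert_absolute_path(curr_dir, relative_path):
--     if len(relative_path) == 0:
--         return curr_dir
--
--     elif relative_path[0] == '' or relative_path[0] == '.':
--         return convert_absolute_path(curr_dir, relative_path[1:])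
--
--     elif relative_path[0] == '..':
--         if len(curr_dir) == 0: return None
--         return convert_absolute_path(curr_dir[:len(curr_dir) - 1], relative_path[1:])
--
--     return convert_absolute_path(curr_dir + [relative_path[0]], relative_path[1:])
-- ===== SOURCE B (Python) =====
-- def convert_string_absolute_path(curr_dir, relative_path_string):
--     parts = relative_path_string.split('/')
--     stack = [] if parts and parts[0] == '' else list(curr_dir)
--     for p in parts:
--         if p == '' or p == '.':
--             continue
--         if p == '..':
--             if not stack:
--                 return None
--             stack.pop()
--         else:
--             stack.append(p)
--     return stack
-- ===== Notes on version B (the rewrite author's own statement) =====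
-- stated objective: simpler
-- what changed: Replaced the pre-filtering deletion pass plus recursive resolver that rebuilds the directory list by slicing/concatenation at every step with a single linear loop over the split components maintaining one stack (append/pop).
import Mathlib
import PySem

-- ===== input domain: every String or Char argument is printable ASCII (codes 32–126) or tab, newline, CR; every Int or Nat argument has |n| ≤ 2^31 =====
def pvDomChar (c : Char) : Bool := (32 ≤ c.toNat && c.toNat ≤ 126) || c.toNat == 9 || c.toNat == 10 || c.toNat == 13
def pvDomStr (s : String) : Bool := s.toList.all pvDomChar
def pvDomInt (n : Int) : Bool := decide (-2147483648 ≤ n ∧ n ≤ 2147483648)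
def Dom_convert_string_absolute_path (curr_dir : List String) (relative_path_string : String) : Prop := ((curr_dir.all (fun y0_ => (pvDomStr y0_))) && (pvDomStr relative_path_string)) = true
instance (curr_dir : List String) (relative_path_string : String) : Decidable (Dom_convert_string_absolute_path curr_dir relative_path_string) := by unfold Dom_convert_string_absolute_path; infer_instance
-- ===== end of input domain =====

-- B replaces A's filter pass + recursive resolver (which rebuilds the directory list by
-- slicing/concatenation at each step) by one linear loop over the components with a stack;
-- objective: simpler.

-- ===== PORT A =====
-- helper: port of convert_absolute_path (A's recursive resolver)
def convert_absolute_path_A (curr_dir : List String) (relative_path : List String) : Option (List String) :=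
  match relative_path with
  | [] => some curr_dir
  | h :: t =>
    if h = "" ∨ h = "." then convert_absolute_path_A curr_dir t
    else if h = ".." then
      if curr_dir.length = 0 then none
      else convert_absolute_path_A (PySem.List.slice curr_dir none (some ((curr_dir.length : Int) - 1))) t
    else convert_absolute_path_A (curr_dir ++ [h]) t

-- helper: A's backward deletion loop (for i in range(len-1,-1,-1): del items[i] if '')
-- ported as a right fold, which processes the indices from the back exactly like the loop
def delEmpty_A (items : List String) : List String :=
  items.foldr (fun x acc => if x = "" then acc else x :: acc) []

def convert_string_absolute_path (curr_dir : List String) (relative_path_string : String) : Option (List String) :=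
  let items := (PySem.Str.split? relative_path_string "/").getD []
  let curr_dir := if 1 ≤ items.length ∧ items.getD 0 "" = "" then [] else curr_dir
  convert_absolute_path_A curr_dir (delEmpty_A items)

-- ===== PORT B =====
-- one step of B's loop over the components; None is absorbing (B's early `return None`)
def pvStepB (st : Option (List String)) (p : String) : Option (List String) :=
  match st with
  | none => none
  | some stack =>
    if p = "" ∨ p = "." then some stack
    else if p = ".." then
      match stack with
      | [] => none
      | _ => some stack.dropLast
    else some (stack ++ [p])

def convert_string_absolute_path_alt (curr_dir : List String) (relative_path_string : String) : Option (List String) :=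
  let parts := (PySem.Str.split? relative_path_string "/").getD []
  let stack := if parts ≠ [] ∧ parts.getD 0 "" = "" then [] else curr_dir
  parts.foldl pvStepB (some stack)

-- ===== PRECONDITION & SPEC =====
def Spec_convert_string_absolute_path (curr_dir : List String) (relative_path_string : String) (out : Option (List String)) : Prop := out = convert_string_absolute_path_alt curr_dir relative_path_string
instance (curr_dir : List String) (relative_path_string : String) (out : Option (List String)) : Decidable (Spec_convert_string_absolute_path curr_dir relative_path_string out) := by unfold Spec_convert_string_absolute_path; infer_instance

-- ===== CLAIM (what is proved, stated in full; the proofs are below) =====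
def Claim_equal_convert_string_absolute_path : Prop := ∀ (curr_dir : List String) (relative_path_string : String), Dom_convert_string_absolute_path curr_dir relative_path_string → Spec_convert_string_absolute_path curr_dir relative_path_string (convert_string_absolute_path curr_dir relative_path_string)

-- ===== LEMMAS AND PROOFS =====

theorem foldl_pvStepB_none (xs : List String) : xs.foldl pvStepB none = none := by
  induction xs with
  | nil => rfl
  | cons h t ih => simpa [pvStepB] using ih

-- A's slice curr_dir[:len-1] is dropLast (for nonempty curr_dir)
theorem slice_pred_eq_dropLast (xs : List String) (hx : xs ≠ []) :
    PySem.List.slice xs none (some ((xs.length : Int) - 1)) = xs.dropLast := by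
  have hlen : 0 < xs.length := List.length_pos_iff.mpr hx
  rw [PySem.List.slice_to]
  · have h2 : ((xs.length : Int) - 1).toNat = xs.length - 1 := by omega
    rw [h2]
    exact List.dropLast_eq_take.symm
  · omega

-- A's recursive resolver equals B's fold
theorem resolver_eq_fold (xs : List String) (cd : List String) :
    convert_absolute_path_A cd xs = xs.foldl pvStepB (some cd) := by
  induction xs generalizing cd with
  | nil => rfl
  | cons h t ih =>
    by_cases h1 : h = "" ∨ h = "."
    · simp [convert_absolute_path_A, pvStepB, h1, ih]
    · by_cases h2 : h = ".."
      · subst h2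
        cases cd with
        | nil => simp [convert_absolute_path_A, pvStepB, foldl_pvStepB_none]
        | cons c cs =>
          rw [show convert_absolute_path_A (c :: cs) (".." :: t)
              = convert_absolute_path_A (PySem.List.slice (c :: cs) none (some (((c :: cs).length : Int) - 1))) t
            from by simp [convert_absolute_path_A]]
          rw [slice_pred_eq_dropLast (c :: cs) (by simp)]
          simp [pvStepB, ih]
      · simp [convert_absolute_path_A, pvStepB, h1, h2, ih]

-- pvStepB ignores empty components, so folding over the filtered list is the same
theorem fold_delEmpty (xs : List String) (st : Option (List String)) :
    (delEmpty_A xs).foldl pvStepB st = xs.foldl pvStepB st := by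
  induction xs generalizing st with
  | nil => rfl
  | cons h t ih =>
    by_cases h1 : h = ""
    · have hst : pvStepB st "" = st := by cases st <;> simp [pvStepB]
      simp [delEmpty_A, h1, List.foldl_cons, hst]
      simpa [delEmpty_A] using ih st
    · simp only [delEmpty_A, List.foldr_cons, if_neg h1, List.foldl_cons]
      simpa [delEmpty_A] using ih (pvStepB st h)

-- ===== VERDICT (by name: the statement is the Claim_ definition above) =====
theorem convert_string_absolute_path_spec : Claim_equal_convert_string_absolute_path := by
  intro cd s _
  unfold Spec_convert_string_absolute_path convert_string_absolute_path convert_string_absolute_path_alt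
  dsimp only
  have hguard : (1 ≤ ((PySem.Str.split? s "/").getD []).length ∧ ((PySem.Str.split? s "/").getD []).getD 0 "" = "")
      ↔ ((PySem.Str.split? s "/").getD [] ≠ [] ∧ ((PySem.Str.split? s "/").getD []).getD 0 "" = "") := by
    constructor
    · rintro ⟨h1, h2⟩; exact ⟨fun he => by rw [he] at h1; simp at h1, h2⟩
    · rintro ⟨h1, h2⟩; exact ⟨List.length_pos_iff.mpr h1, h2⟩
  rw [resolver_eq_fold, fold_delEmpty]
  by_cases hg : 1 ≤ ((PySem.Str.split? s "/").getD []).length ∧ ((PySem.Str.split? s "/").getD []).getD 0 "" = ""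
  · rw [if_pos hg, if_pos (hguard.mp hg)]
  · rw [if_neg hg, if_neg (fun h => hg (hguard.mpr h))]
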